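-- pv_equiv track=rewrite | github.com/ShivamXxd/DAA | Greedy_algorithm_assignment/Practical8_Shop_in_a_candy_store.py | candyStore
-- ===== SOURCE A (Python) =====
-- from typing import List
-- import math
--
-- def candyStore(arr: List[int], N: int, K: int) -> List[int]:
--     arr.sort()
--
--     buy_count = math.ceil(N / (K + 1))
--
--     min_amt = 0
--     max_amt = 0
--
--     for i in range(buy_count):
--         min_amt += arr[i]
--
--     for i in range(1, buy_count + 1):
--         max_amt += arr[-i]
--
--     return [min_amt, max_amt]
-- ===== SOURCE B (Python) =====
-- from typing import List
--
-- def _sum_smallest(xs: List[int], k: int) -> int: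
--     # quickselect-style partial selection: sum of the k smallest elements of xs
--     # (0 if k <= 0, sum of all of xs if k >= len(xs)); iterative, middle pivot
--     acc = 0
--     while k > 0 and xs:
--         p = xs[len(xs) // 2]
--         lt = [x for x in xs if x < p]
--         gt = [x for x in xs if p < x]
--         eq = len(xs) - len(lt) - len(gt)   # multiplicity of the pivot value
--         if k <= len(lt):
--             xs = lt
--         elif k <= len(lt) + eq:
--             return acc + sum(lt) + (k - len(lt)) * p
--         else:
--             acc += sum(lt) + eq * p
--             k -= len(lt) + eq
--             xs = gt
--     return acc
--
-- def candyStore(arr: List[int], N: int, K: int) -> List[int]: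
--     c = -((-N) // (K + 1))          # ceil(N / (K+1)), exact on ints
--     if c <= 0:
--         return [0, 0]
--     return [_sum_smallest(arr, c), sum(arr) - _sum_smallest(arr, len(arr) - c)]
-- ===== Notes on version B (the rewrite author's own statement) =====
-- stated objective: alternative
-- what changed: B replaces A's full sort plus two index loops by an iterative quickselect-style three-way-partition selection that sums the k smallest elements directly (k largest obtained as total minus the n-k smallest), never sorting the list; intended as faster, but measured only ~1.2x at the largest size, so no speed claim.
import Mathlib
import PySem

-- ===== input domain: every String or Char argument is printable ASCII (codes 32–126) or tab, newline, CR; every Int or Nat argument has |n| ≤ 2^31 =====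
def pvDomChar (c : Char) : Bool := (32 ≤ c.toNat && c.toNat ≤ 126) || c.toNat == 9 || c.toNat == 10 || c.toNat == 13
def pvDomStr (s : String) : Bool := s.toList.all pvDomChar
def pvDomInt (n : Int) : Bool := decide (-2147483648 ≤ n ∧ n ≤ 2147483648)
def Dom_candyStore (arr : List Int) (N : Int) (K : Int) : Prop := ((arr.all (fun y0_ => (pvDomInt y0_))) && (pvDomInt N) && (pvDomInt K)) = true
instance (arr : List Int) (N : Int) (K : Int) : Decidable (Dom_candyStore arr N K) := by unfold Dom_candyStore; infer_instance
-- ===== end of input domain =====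

-- B replaces A's full sort with an iterative quickselect-style partial selection (sum of k smallest
-- elements; the k largest via total − (n−k) smallest). Equivalence is about the RETURN value only:
-- A sorts its argument list in place, B does not mutate it.


-- ===== PORT A =====
-- arr.sort() sorts in place; the later reads all see the sorted list, so we bind it once.
-- math.ceil(N / (K + 1)) is ported as exact integer ceiling division -((-N) // (K+1)): on Dom
-- (|N|, |K| ≤ 2^31) the float quotient is precise enough that math.ceil of it equals the
-- integer ceiling.
def candyStore (arr : List Int) (N : Int) (K : Int) : List Int :=
  let arr := PySem.List.sorted arr (fun x => x)
  let buyCount := -(PySem.Int.floordiv (-N) (K + 1))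
  let minAmt := (PySem.List.pyRange 0 buyCount 1).foldl (fun a i => a + PySem.List.pyGetD arr i 0) 0
  let maxAmt := (PySem.List.pyRange 1 (buyCount + 1) 1).foldl (fun a i => a + PySem.List.pyGetD arr (-i) 0) 0
  [minAmt, maxAmt]

-- ===== PORT B =====
-- xs[len(xs) // 2] is ported with List.getD: the index is always in range (xs ≠ []).
def sumSmallest (xs : List Int) (k : Int) (acc : Int) : Int :=
  if _h : k ≤ 0 ∨ xs = [] then acc
  else
    let p := xs.getD (xs.length / 2) 0
    let lt := xs.filter (fun x => x < p)
    let gt := xs.filter (fun x => p < x)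
    let eqn : Int := (xs.length : Int) - (lt.length : Int) - (gt.length : Int)
    if k ≤ (lt.length : Int) then sumSmallest lt k acc
    else if k ≤ (lt.length : Int) + eqn then acc + lt.sum + (k - (lt.length : Int)) * p
    else sumSmallest gt (k - (lt.length : Int) - eqn) (acc + lt.sum + eqn * p)
termination_by xs.length
decreasing_by
  all_goals
    have hxs : xs ≠ [] := by tauto
    have hlen : 0 < xs.length := List.length_pos_iff.mpr hxs
    have hidx : xs.length / 2 < xs.length := Nat.div_lt_self hlen (by norm_num)
    have hp : xs.getD (xs.length / 2) 0 ∈ xs := by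
      rw [List.getD_eq_getElem _ _ hidx]; exact List.getElem_mem hidx
    simp only [List.length_unattach]
    conv_rhs => rw [← List.length_attach (l := xs)]
    exact List.length_filter_lt_length_iff_exists.mpr ⟨⟨_, hp⟩, List.mem_attach xs _, by simp⟩

def candyStore_alt (arr : List Int) (N : Int) (K : Int) : List Int :=
  let c := -(PySem.Int.floordiv (-N) (K + 1))
  if c ≤ 0 then [0, 0]
  else [sumSmallest arr c 0, arr.sum - sumSmallest arr ((arr.length : Int) - c) 0]

-- ===== PRECONDITION & SPEC =====
-- Pre_ is exactly where the Python A returns: K = -1 raises ZeroDivisionError, and a buy count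
-- exceeding len(arr) raises IndexError on arr[i].
def Pre_candyStore (arr : List Int) (N : Int) (K : Int) : Prop :=
  K ≠ -1 ∧ -(PySem.Int.floordiv (-N) (K + 1)) ≤ (arr.length : Int)
instance (arr : List Int) (N : Int) (K : Int) : Decidable (Pre_candyStore arr N K) := by
  unfold Pre_candyStore; infer_instance

def pvWitness_candyStore : List Int × Int × Int := ([3, 1, 4, 2], 4, 1)

def Spec_candyStore (arr : List Int) (N : Int) (K : Int) (out : List Int) : Prop := out = candyStore_alt arr N K
instance (arr : List Int) (N : Int) (K : Int) (out : List Int) : Decidable (Spec_candyStore arr N K out) := by unfold Spec_candyStore; infer_instance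

-- ===== CLAIM (what is proved, stated in full; the proofs are below) =====
def Claim_equal_candyStore : Prop := ∀ (arr : List Int) (N : Int) (K : Int), Dom_candyStore arr N K → Pre_candyStore arr N K → Spec_candyStore arr N K (candyStore arr N K)

-- ===== LEMMAS AND PROOFS =====

-- A's first loop sums the first m entries of the sorted list.
lemma foldl_take_sum (s : List Int) (m : Nat) (hm : m ≤ s.length) :
    (PySem.List.pyRange 0 (m : Int) 1).foldl (fun a i => a + PySem.List.pyGetD s i 0) 0
      = (s.take m).sum := by
  induction m with
  | zero => simp [PySem.List.pyRange_one_eq_nil]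
  | succ m ih =>
    have h1 : ((m + 1 : Nat) : Int) = (m : Int) + 1 := by omega
    rw [h1, PySem.List.pyRange_one_succ_right (by omega), List.foldl_append]
    have hm' : m < s.length := by omega
    rw [ih (by omega)]
    simp only [List.foldl_cons, List.foldl_nil]
    rw [PySem.List.pyGetD_eq_getElem s 0 (by omega) (by exact_mod_cast hm'),
      List.sum_take_succ s m hm']
    simp

-- A's second loop sums the last m entries of the sorted list.
lemma foldl_drop_sum (s : List Int) (m : Nat) (hm : m ≤ s.length) :
    (PySem.List.pyRange 1 ((m : Int) + 1) 1).foldl (fun a i => a + PySem.List.pyGetD s (-i) 0) 0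
      = (s.drop (s.length - m)).sum := by
  induction m with
  | zero => simp [PySem.List.pyRange_one_eq_nil]
  | succ m ih =>
    have h1 : ((m + 1 : Nat) : Int) + 1 = ((m : Int) + 1) + 1 := by omega
    rw [h1, PySem.List.pyRange_one_succ_right (by omega), List.foldl_append]
    rw [ih (by omega)]
    simp only [List.foldl_cons, List.foldl_nil]
    have hlt : s.length - (m + 1) < s.length := by omega
    have hget : PySem.List.pyGetD s (-((m : Int) + 1)) 0 = s[s.length - (m + 1)] := by
      simp only [PySem.List.pyGetD, PySem.List.pyGet?, PySem.List.pyIdx?]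
      have hc1 : ¬ (0 : Int) ≤ -((m : Int) + 1) := by omega
      have hc2 : -((s.length : Nat) : Int) ≤ -((m : Int) + 1) := by
        omega
      rw [if_neg hc1, if_pos hc2]
      have : (-(-((m : Int) + 1))).toNat = m + 1 := by omega
      rw [this]
      simp [List.getElem?_eq_getElem hlt]
    rw [hget, List.drop_eq_getElem_cons hlt, List.sum_cons]
    have : s.length - (m + 1) + 1 = s.length - m := by omega
    rw [this]
    ring

-- sorted xs splits at any pivot value p into (sorted smaller) ++ (copies of p) ++ (sorted larger).
lemma sorted_decomp (xs : List Int) (p : Int) :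
    PySem.List.sorted xs (fun x => x) =
      PySem.List.sorted (xs.filter (fun x => x < p)) (fun x => x)
        ++ xs.filter (fun x => x == p)
        ++ PySem.List.sorted (xs.filter (fun x => p < x)) (fun x => x) := by
  apply PySem.List.sorted_id_eq_of_perm_of_pairwise
  · rw [List.perm_iff_count]
    intro a
    have c1 := (PySem.List.sorted_perm (xs.filter (fun x => x < p)) (fun x => x) false).count_eq a
    have c3 := (PySem.List.sorted_perm (xs.filter (fun x => p < x)) (fun x => x) false).count_eq a
    simp only [List.count_append, c1, c3]
    have z : ∀ (q : Int → Bool), q a = false → List.count a (xs.filter q) = 0 := by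
      intro q hq
      rw [List.count_eq_zero]
      intro hmem
      rw [(List.mem_filter.mp hmem).2] at hq
      exact Bool.true_eq_false.mp hq
    rcases lt_trichotomy a p with h | h | h
    · rw [List.count_filter (p := fun x => decide (x < p)) (by simpa using h),
        z (fun x => x == p) (by simp; omega), z (fun x => decide (p < x)) (by simp; omega)]
      omega
    · subst h
      rw [List.count_filter (p := fun x => x == a) (by simp),
        z (fun x => decide (x < a)) (by simp), z (fun x => decide (a < x)) (by simp)]
      omega
    · rw [List.count_filter (p := fun x => decide (p < x)) (by simpa using h),
        z (fun x => decide (x < p)) (by simp; omega), z (fun x => x == p) (by simp; omega)]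
      omega
  · have m1 : ∀ a ∈ PySem.List.sorted (xs.filter (fun x => x < p)) (fun x => x), a < p := by
      intro a ha
      have := (PySem.List.mem_sorted _ _ _ _).mp ha
      simpa using (List.mem_filter.mp this).2
    have m2 : ∀ a ∈ xs.filter (fun x => x == p), a = p := by
      intro a ha
      simpa using (List.mem_filter.mp ha).2
    have m3 : ∀ a ∈ PySem.List.sorted (xs.filter (fun x => p < x)) (fun x => x), p < a := by
      intro a ha
      have := (PySem.List.mem_sorted _ _ _ _).mp ha
      simpa using (List.mem_filter.mp this).2
    rw [List.append_assoc, List.pairwise_append]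
    refine ⟨by simpa using PySem.List.sorted_pairwise (xs.filter (fun x => x < p)) (fun x => x),
      ?_, ?_⟩
    · rw [List.pairwise_append]
      refine ⟨List.pairwise_of_forall_mem_list (fun a ha b hb => by rw [m2 a ha, m2 b hb]),
        by simpa using PySem.List.sorted_pairwise (xs.filter (fun x => p < x)) (fun x => x),
        fun a ha b hb => ?_⟩
      have := m2 a ha; have := m3 b hb; omega
    · intro a ha b hb
      have hap := m1 a ha
      rcases List.mem_append.mp hb with hb | hb
      · have := m2 b hb; omega
      · have := m3 b hb; omega

-- every element of the equal-block is p, so its sum is length * p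
lemma sum_of_all_eq (l : List Int) (p : Int) (h : ∀ x ∈ l, x = p) :
    l.sum = (l.length : Int) * p := by
  rw [List.sum_eq_card_nsmul l p h]
  simp

-- sumSmallest computes acc + (sum of the k smallest elements of xs)
lemma sumSmallest_spec (n : Nat) : ∀ (xs : List Int), xs.length ≤ n → ∀ (k acc : Int),
    sumSmallest xs k acc = acc + ((PySem.List.sorted xs (fun x => x)).take k.toNat).sum := by
  induction n with
  | zero =>
    intro xs hn k acc
    have : xs = [] := by cases xs <;> simp_all
    subst this
    rw [sumSmallest]
    simp [PySem.List.sorted]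
  | succ n ih =>
    intro xs hn k acc
    rw [sumSmallest]
    by_cases h0 : k ≤ 0 ∨ xs = []
    · rw [dif_pos h0]
      rcases h0 with h0 | h0
      · have : k.toNat = 0 := by omega
        simp [this]
      · subst h0; simp [PySem.List.sorted]
    · rw [dif_neg h0]
      push Not at h0
      obtain ⟨hk, hxs⟩ := h0
      simp only []
      set p := xs.getD (xs.length / 2) 0 with hp
      set lt := xs.filter (fun x => x < p) with hlt
      set eql := xs.filter (fun x => x == p) with heql
      set gt := xs.filter (fun x => p < x) with hgt
      -- pivot is a member, so both strict parts are shorter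
      have hlenpos : 0 < xs.length := List.length_pos_iff.mpr hxs
      have hidx : xs.length / 2 < xs.length := Nat.div_lt_self hlenpos (by norm_num)
      have hpm : p ∈ xs := by
        rw [hp, List.getD_eq_getElem _ _ hidx]; exact List.getElem_mem hidx
      have hltlen : lt.length < xs.length :=
        List.length_filter_lt_length_iff_exists.mpr ⟨p, hpm, by simp⟩
      have hgtlen : gt.length < xs.length :=
        List.length_filter_lt_length_iff_exists.mpr ⟨p, hpm, by simp⟩
      have hdec := sorted_decomp xs p
      rw [← hlt, ← heql, ← hgt] at hdec
      -- length bookkeeping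
      have hlensum : xs.length = lt.length + eql.length + gt.length := by
        have := congrArg List.length hdec
        simp only [List.length_append, PySem.List.length_sorted] at this
        omega
      have heqn : (xs.length : Int) - (lt.length : Int) - (gt.length : Int) = (eql.length : Int) := by
        omega
      rw [heqn]
      have hL1 : (PySem.List.sorted lt (fun x => x)).length = lt.length :=
        PySem.List.length_sorted _ _ _
      have hsum1 : (PySem.List.sorted lt (fun x => x)).sum = lt.sum :=
        (PySem.List.sorted_perm lt (fun x => x) false).sum_eq
      have heqall : ∀ x ∈ eql, x = p := fun x hx => by
        simpa using (List.mem_filter.mp hx).2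
      split_ifs with h1 h2
      · -- k ≤ |lt| : recurse into lt
        rw [ih lt (by omega) k acc, hdec, List.append_assoc,
          List.take_append_of_le_length (by rw [hL1]; omega)]
      · -- the k-th smallest is a copy of the pivot
        rw [hdec, List.append_assoc, List.take_append, List.take_append]
        have ht1 : (PySem.List.sorted lt (fun x => x)).take k.toNat
            = PySem.List.sorted lt (fun x => x) := List.take_of_length_le (by omega)
        have ht2 : (eql.take (k.toNat - (PySem.List.sorted lt (fun x => x)).length)).length
            = k.toNat - lt.length := by
          rw [hL1, List.length_take]; omega
        have ht3 : k.toNat - (PySem.List.sorted lt (fun x => x)).length - eql.length = 0 := by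
          rw [hL1]; omega
        rw [ht1, ht3, List.take_zero, List.sum_append, List.sum_append, List.sum_nil, hsum1,
          sum_of_all_eq _ p (fun x hx => heqall x (List.mem_of_mem_take hx)), ht2]
        have : ((k.toNat - lt.length : Nat) : Int) = k - (lt.length : Int) := by omega
        rw [this]; ring
      · -- k exceeds |lt| + |eql| : recurse into gt
        rw [ih gt (by omega) _ _, hdec, List.append_assoc, List.take_append, List.take_append]
        have ht1 : (PySem.List.sorted lt (fun x => x)).take k.toNat
            = PySem.List.sorted lt (fun x => x) := List.take_of_length_le (by omega)
        have ht2 : eql.take (k.toNat - (PySem.List.sorted lt (fun x => x)).length) = eql :=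
          List.take_of_length_le (by rw [hL1]; omega)
        have ht3 : (k - (lt.length : Int) - (eql.length : Int)).toNat
            = k.toNat - (PySem.List.sorted lt (fun x => x)).length - eql.length := by
          rw [hL1]; omega
        rw [ht1, ht2, ht3, List.sum_append, List.sum_append, hsum1,
          sum_of_all_eq _ p heqall]
        ring

-- ===== VERDICT (by name: the statement is the Claim_ definition above) =====
theorem candyStore_spec : Claim_equal_candyStore := by
  intro arr N K _hdom hpre
  obtain ⟨hK, hc⟩ := hpre
  unfold Spec_candyStore candyStore candyStore_alt
  simp only []
  set c := -(PySem.Int.floordiv (-N) (K + 1)) with hcdef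
  set s := PySem.List.sorted arr (fun x => x) with hs
  have hslen : s.length = arr.length := PySem.List.length_sorted _ _ _
  by_cases hc0 : c ≤ 0
  · rw [if_pos hc0, PySem.List.pyRange_one_eq_nil hc0,
      PySem.List.pyRange_one_eq_nil (by omega)]
    simp
  · rw [if_neg hc0]
    push Not at hc0
    have hcn : c = ((c.toNat : Nat) : Int) := by omega
    have hcle : c.toNat ≤ s.length := by omega
    have hmin : (PySem.List.pyRange 0 c 1).foldl (fun a i => a + PySem.List.pyGetD s i 0) 0
        = (s.take c.toNat).sum := by
      rw [hcn]; exact foldl_take_sum s c.toNat hcle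
    have hmax : (PySem.List.pyRange 1 (c + 1) 1).foldl (fun a i => a + PySem.List.pyGetD s (-i) 0) 0
        = (s.drop (s.length - c.toNat)).sum := by
      rw [hcn]; exact foldl_drop_sum s c.toNat hcle
    have hB1 : sumSmallest arr c 0 = (s.take c.toNat).sum := by
      rw [sumSmallest_spec arr.length arr le_rfl c 0, ← hs]; ring
    have hB2 : arr.sum - sumSmallest arr ((arr.length : Int) - c) 0
        = (s.drop (s.length - c.toNat)).sum := by
      rw [sumSmallest_spec arr.length arr le_rfl _ 0, ← hs]
      have harrsum : arr.sum = s.sum := ((PySem.List.sorted_perm arr (fun x => x) false).sum_eq).symm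
      have htn : ((arr.length : Int) - c).toNat = s.length - c.toNat := by omega
      rw [harrsum, htn, ← List.sum_take_add_sum_drop s (s.length - c.toNat)]
      ring
    rw [hmin, hmax, hB1, hB2]
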